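-- pv_equiv track=rewrite | github.com/callmepvp/SAS-4-Editor | Utilities/HandleEncryptions.py | hash1
-- ===== SOURCE A (Python) =====
-- def hash2(num):
--     loc4 = 3988292384
--     for _ in range(8):
--         if num & 1:
--             num = (num >> 1) ^ loc4
--         else:
--             num = num >> 1
--     return num
--
-- def hash1(buf):
--     hash_val = 0
--     for b in buf:
--         hash_val = ((hash_val >> 8) & 16777215) ^ hash2((hash_val ^ b) & 255)
--     if hash_val < 0:
--         hash_val = 4294967295 + hash_val + 1
--     hash_str = hex(hash_val)[2:]
--     return hash_str.zfill(8)
-- ===== SOURCE B (Python) =====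
-- # Table-driven CRC: precompute the 256-entry CRC table once, so the per-byte
-- # 8-step bit loop of A is replaced by a single table lookup per byte.
-- _TABLE = []
-- for _n in range(256):
--     _c = _n
--     for _ in range(8):
--         _c = (_c >> 1) ^ (3988292384 if _c & 1 else 0)
--     _TABLE.append(_c)
--
-- def hash1(buf):
--     h = 0
--     for b in buf:
--         h = ((h >> 8) & 16777215) ^ _TABLE[(h ^ b) & 255]
--     return hex(h)[2:].zfill(8)
-- ===== Notes on version B (the rewrite author's own statement) =====
-- stated objective: faster
-- what changed: Replaces A's per-byte call to hash2 (an 8-iteration bit loop) with a single lookup into a 256-entry CRC table precomputed once at module load.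
import Mathlib
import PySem

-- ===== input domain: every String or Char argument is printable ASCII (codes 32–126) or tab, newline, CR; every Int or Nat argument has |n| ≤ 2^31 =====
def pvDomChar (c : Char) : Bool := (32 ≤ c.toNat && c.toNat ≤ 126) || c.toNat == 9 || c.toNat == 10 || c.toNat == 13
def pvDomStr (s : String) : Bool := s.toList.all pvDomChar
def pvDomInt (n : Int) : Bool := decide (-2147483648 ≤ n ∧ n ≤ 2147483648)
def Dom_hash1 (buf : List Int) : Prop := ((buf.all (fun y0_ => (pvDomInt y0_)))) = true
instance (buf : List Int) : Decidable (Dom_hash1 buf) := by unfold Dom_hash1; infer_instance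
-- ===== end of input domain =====

-- B replaces A's per-byte 8-step bit loop by a precomputed 256-entry CRC table
-- (one lookup per byte); same result, same hex formatting.

-- shared formatting helper: transcription of `hex(v)[2:].zfill(8)`, the exact
-- expression both Pythons use (exact for v ≥ 0; for v < 0 it mirrors
-- hex(-n) = '-0x…' → [2:] = 'x…')
def pvHexDigitChar (n : Nat) : Char := if n < 10 then Char.ofNat (48 + n) else Char.ofNat (87 + n)

def pvHexChars (n : Nat) : List Char :=
  if _h : n < 16 then [pvHexDigitChar n]
  else pvHexChars (n / 16) ++ [pvHexDigitChar (n % 16)]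
  decreasing_by exact Nat.div_lt_self (by omega) (by omega)

def pvHexZfill8 (v : Int) : String :=
  PySem.Str.zfill (if v < 0 then String.ofList ('x' :: pvHexChars (-v).toNat) else String.ofList (pvHexChars v.toNat)) 8

-- ===== PORT A =====
def hash2 (num : Int) : Int :=
  (List.range 8).foldl
    (fun n _ => if PySem.Int.band n 1 ≠ 0 then PySem.Int.bxor (n >>> (1:Nat)) 3988292384 else n >>> (1:Nat))
    num

def hash1 (buf : List Int) : String :=
  let hv := buf.foldl
    (fun h b => PySem.Int.bxor (PySem.Int.band (h >>> (8:Nat)) 16777215)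
                  (hash2 (PySem.Int.band (PySem.Int.bxor h b) 255))) 0
  let hv2 := if hv < 0 then 4294967295 + hv + 1 else hv
  pvHexZfill8 hv2

-- ===== PORT B =====
-- the module-level table `_TABLE` of Source B
def crcTable : List Int :=
  (List.range 256).map (fun n : Nat =>
    (List.range 8).foldl
      (fun c _ => PySem.Int.bxor (c >>> (1:Nat)) (if PySem.Int.band c 1 ≠ 0 then 3988292384 else 0))
      (n : Int))

def hash1_alt (buf : List Int) : String :=
  pvHexZfill8 (buf.foldl
    (fun h b => PySem.Int.bxor (PySem.Int.band (h >>> (8:Nat)) 16777215)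
      -- index is always in [0,256): `_TABLE[(h ^ b) & 255]` never raises, default unused
      (PySem.List.pyGetD crcTable (PySem.Int.band (PySem.Int.bxor h b) 255) 0)) 0)

-- ===== PRECONDITION & SPEC =====
def Spec_hash1 (buf : List Int) (out : String) : Prop := out = hash1_alt buf
instance (buf : List Int) (out : String) : Decidable (Spec_hash1 buf out) := by unfold Spec_hash1; infer_instance

-- ===== CLAIM (what is proved, stated in full; the proofs are below) =====
def Claim_equal_hash1 : Prop := ∀ (buf : List Int), Dom_hash1 buf → Spec_hash1 buf (hash1 buf)

-- ===== LEMMAS AND PROOFS =====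

theorem band255_nonneg (x : Int) : 0 ≤ PySem.Int.band x 255 :=
  PySem.Int.band_comm x 255 ▸ PySem.Int.band_nonneg_of_nonneg_left x (by norm_num)

theorem band255_lt (x : Int) : PySem.Int.band x 255 < 256 := by
  unfold PySem.Int.band
  by_cases h : 0 ≤ x
  · rw [if_pos h, if_pos (by norm_num : (0:Int) ≤ 255)]
    have h1 := @Nat.and_le_right x.toNat (255:Int).toNat
    have h2 : (255:Int).toNat = 255 := rfl
    omega
  · rw [if_neg h, if_pos (by norm_num : (0:Int) ≤ 255)]
    have h2 : (255:Int).toNat = 255 := rfl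
    omega

theorem bxor_nonneg {a b : Int} (ha : 0 ≤ a) (hb : 0 ≤ b) : 0 ≤ PySem.Int.bxor a b := by
  rw [PySem.Int.bxor_of_nonneg ha hb]; exact Int.natCast_nonneg _

theorem shiftRight_nonneg {a : Int} (ha : 0 ≤ a) (k : Nat) : 0 ≤ a >>> k := by
  rw [Int.shiftRight_eq_div_pow]; exact Int.ediv_nonneg ha (by positivity)

theorem hash2_nonneg {num : Int} (h : 0 ≤ num) : 0 ≤ hash2 num := by
  unfold hash2
  have : ∀ (l : List Nat) (n : Int), 0 ≤ n →
      0 ≤ l.foldl (fun n _ => if PySem.Int.band n 1 ≠ 0 then PySem.Int.bxor (n >>> (1:Nat)) 3988292384 else n >>> (1:Nat)) n := by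
    intro l
    induction l with
    | nil => intro n hn; simpa using hn
    | cons x xs ih =>
      intro n hn
      simp only [List.foldl_cons]
      apply ih
      split_ifs
      · exact bxor_nonneg (shiftRight_nonneg hn 1) (by norm_num)
      · exact shiftRight_nonneg hn 1
  exact this _ num h

-- the table-building step equals hash2's step (x ^ 0 = x)
theorem step_eq :
    (fun (c : Int) (_ : Nat) => PySem.Int.bxor (c >>> (1:Nat)) (if PySem.Int.band c 1 ≠ 0 then 3988292384 else 0))
      = (fun (n : Int) (_ : Nat) => if PySem.Int.band n 1 ≠ 0 then PySem.Int.bxor (n >>> (1:Nat)) 3988292384 else n >>> (1:Nat)) := by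
  funext c _
  split_ifs with h
  · rfl
  · exact PySem.Int.bxor_zero _

theorem crcTable_eq : crcTable = (List.range 256).map (fun n : Nat => hash2 (n : Int)) := by
  unfold crcTable hash2
  exact List.map_congr_left (fun n _ => by rw [step_eq])

theorem lookup_eq_hash2 (i : Int) (h0 : 0 ≤ i) (h1 : i < 256) :
    PySem.List.pyGetD crcTable i 0 = hash2 i := by
  rw [crcTable_eq]
  have hlen : i < (((List.range 256).map (fun n : Nat => hash2 (n : Int))).length : Int) := by
    simp only [List.length_map, List.length_range]; omega
  rw [PySem.List.pyGetD_eq_getElem _ 0 h0 hlen]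
  rw [List.getElem_map, List.getElem_range, Int.toNat_of_nonneg h0]

theorem fold_eq (buf : List Int) :
    buf.foldl (fun h b => PySem.Int.bxor (PySem.Int.band (h >>> (8:Nat)) 16777215)
        (hash2 (PySem.Int.band (PySem.Int.bxor h b) 255))) 0
      = buf.foldl (fun h b => PySem.Int.bxor (PySem.Int.band (h >>> (8:Nat)) 16777215)
        (PySem.List.pyGetD crcTable (PySem.Int.band (PySem.Int.bxor h b) 255) 0)) 0 := by
  have : (fun (h b : Int) => PySem.Int.bxor (PySem.Int.band (h >>> (8:Nat)) 16777215)
        (hash2 (PySem.Int.band (PySem.Int.bxor h b) 255)))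
      = (fun (h b : Int) => PySem.Int.bxor (PySem.Int.band (h >>> (8:Nat)) 16777215)
        (PySem.List.pyGetD crcTable (PySem.Int.band (PySem.Int.bxor h b) 255) 0)) := by
    funext h b
    rw [lookup_eq_hash2 _ (band255_nonneg _) (band255_lt _)]
  rw [this]

theorem fold_nonneg (buf : List Int) :
    0 ≤ buf.foldl (fun h b => PySem.Int.bxor (PySem.Int.band (h >>> (8:Nat)) 16777215)
        (hash2 (PySem.Int.band (PySem.Int.bxor h b) 255))) 0 := by
  have : ∀ (l : List Int) (a : Int), 0 ≤ a →
      0 ≤ l.foldl (fun h b => PySem.Int.bxor (PySem.Int.band (h >>> (8:Nat)) 16777215)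
        (hash2 (PySem.Int.band (PySem.Int.bxor h b) 255))) a := by
    intro l
    induction l with
    | nil => intro a ha; simpa using ha
    | cons x xs ih =>
      intro a ha
      simp only [List.foldl_cons]
      exact ih _ (bxor_nonneg
        (PySem.Int.band_nonneg_of_nonneg_left _ (shiftRight_nonneg ha 8))
        (hash2_nonneg (band255_nonneg _)))
  exact this buf 0 le_rfl

-- ===== VERDICT (by name: the statement is the Claim_ definition above) =====
theorem hash1_spec : Claim_equal_hash1 := by
  intro buf _
  unfold Spec_hash1 hash1 hash1_alt
  simp only [← fold_eq buf]
  have hnn := fold_nonneg buf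
  rw [if_neg (by omega)]
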